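-- pv_equiv track=rewrite | github.com/Saildrone/cantools | cantools/database/can/cpp_source.py | _strip_blank_lines
-- ===== SOURCE A (Python) =====
-- def _strip_blank_lines(lines):
--     try:
--         while lines[0] == '':
--             lines = lines[1:]
--
--         while lines[-1] == '':
--             lines = lines[:-1]
--     except IndexError:
--         pass
--
--     return lines
-- ===== SOURCE B (Python) =====
-- def _strip_blank_lines(lines):
--     idx = [i for i, l in enumerate(lines) if l != '']
--     if not idx:
--         return []
--     return lines[idx[0]:idx[-1] + 1]
-- ===== Notes on version B (the rewrite author's own statement) =====
-- stated objective: simpler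
-- what changed: Instead of repeatedly carving one-element slices off each end inside a try/except, B finds the non-blank indices in one enumerate pass and returns a single slice (or [] if none), with no exception handling.
import Mathlib
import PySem

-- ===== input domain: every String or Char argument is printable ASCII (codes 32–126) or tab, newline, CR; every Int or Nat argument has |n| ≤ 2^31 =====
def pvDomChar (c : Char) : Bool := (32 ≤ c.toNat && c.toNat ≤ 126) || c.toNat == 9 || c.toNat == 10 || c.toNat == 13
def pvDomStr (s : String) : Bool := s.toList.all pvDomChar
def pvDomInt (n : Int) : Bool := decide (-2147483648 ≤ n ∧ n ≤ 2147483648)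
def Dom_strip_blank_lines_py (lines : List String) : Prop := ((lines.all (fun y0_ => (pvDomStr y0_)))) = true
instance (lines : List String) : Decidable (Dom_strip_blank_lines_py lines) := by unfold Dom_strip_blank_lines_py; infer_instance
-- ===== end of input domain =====

-- B strips leading/trailing blank lines by one enumerate pass + a single slice, replacing
-- A's repeated one-element slicing inside a try/except.  A does not mutate its argument.

-- ===== PORT A =====
-- 'while lines[0] == "": lines = lines[1:]' — returns the remaining list and whether
-- lines[0] raised IndexError (list became empty).  The second while loop has the same
-- shape on the reversed list ('lines[-1]' / 'lines[:-1]').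
def pyDropBlankLoop : List String → List String × Bool
  | [] => ([], true)
  | x :: xs => if x == "" then pyDropBlankLoop xs else (x :: xs, false)

def strip_blank_lines_py (lines : List String) : List String :=
  let (f, exc) := pyDropBlankLoop lines
  if exc then f
  else ((pyDropBlankLoop f.reverse).1).reverse

-- ===== PORT B =====
def strip_blank_lines_py_alt (lines : List String) : List String :=
  let idx := ((PySem.List.enumerate lines 0).filter (fun p => p.2 != "")).map (·.1)
  match idx with
  | [] => []
  | i :: rest => PySem.List.slice lines (some i) (some (rest.getLastD i + 1))

-- ===== PRECONDITION & SPEC =====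
def Spec_strip_blank_lines_py (lines : List String) (out : List String) : Prop := out = strip_blank_lines_py_alt lines
instance (lines : List String) (out : List String) : Decidable (Spec_strip_blank_lines_py lines out) := by unfold Spec_strip_blank_lines_py; infer_instance

-- ===== CLAIM (what is proved, stated in full; the proofs are below) =====
def Claim_equal_strip_blank_lines_py : Prop := ∀ (lines : List String), Dom_strip_blank_lines_py lines → Spec_strip_blank_lines_py lines (strip_blank_lines_py lines)

-- ===== LEMMAS AND PROOFS =====

-- canonical right-strip: remove trailing blank lines
def rstripB : List String → List String
  | [] => []
  | y :: ys => if y == "" ∧ rstripB ys = [] then [] else y :: rstripB ys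

-- nat-index version of B's index list
def nidx : List String → Nat → List Nat
  | [], _ => []
  | x :: xs, s => if x == "" then nidx xs (s + 1) else s :: nidx xs (s + 1)

theorem pyDropBlankLoop_eq (l : List String) :
    pyDropBlankLoop l = (l.dropWhile (fun x => x == ""), l.all (fun x => x == "")) := by
  induction l with
  | nil => simp [pyDropBlankLoop]
  | cons x xs ih =>
    by_cases h : x == ""
    · simp [pyDropBlankLoop, List.dropWhile, h, ih]
    · simp [pyDropBlankLoop, List.dropWhile, h]

theorem rev_dropWhile_rev (m : List String) :
    (m.reverse.dropWhile (fun x => x == "")).reverse = rstripB m := by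
  induction m with
  | nil => simp [rstripB]
  | cons y ys ih =>
    rw [rstripB, List.reverse_cons, List.dropWhile_append]
    by_cases h : (ys.reverse.dropWhile (fun x => x == "")) = []
    · have hr : rstripB ys = [] := by rw [← ih, h]; simp
      by_cases hy : y == ""
      · simp [h, hy, hr, List.dropWhile]
      · simp [h, hy, hr, List.dropWhile]
    · have hr : rstripB ys ≠ [] := by rw [← ih]; simpa using h
      simp [h, hr, ih]

theorem nidx_shift (xs : List String) (s : Nat) :
    nidx xs (s + 1) = (nidx xs s).map (· + 1) := by
  induction xs generalizing s with
  | nil => simp [nidx]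
  | cons x xs ih =>
    by_cases h : x == "" <;> simp [nidx, h, ih]

theorem enum_filter_eq_nidx (xs : List String) (s : Nat) :
    ((PySem.List.enumerate xs (s : Int)).filter (fun p => p.2 != "")).map (·.1)
      = (nidx xs s).map (fun (k : Nat) => (k : Int)) := by
  induction xs generalizing s with
  | nil => rw [PySem.List.enumerate_nil]; rfl
  | cons x xs ih =>
    rw [PySem.List.enumerate_cons, List.filter_cons,
        show ((s : Int) + 1) = ((s + 1 : Nat) : Int) by push_cast; ring]
    by_cases h : x = ""
    · have hb : ((((s : Int)), x).2 != "") = false := by simp [h]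
      rw [hb, if_neg (by simp), ih, nidx, if_pos (by simp [h])]
    · have hb : ((((s : Int)), x).2 != "") = true := by simp [h]
      rw [hb, if_pos rfl, List.map_cons, ih, nidx, if_neg (by simp [h]), List.map_cons]

theorem getLastD_map_add (l : List Nat) (d : Nat) :
    (l.map (· + 1)).getLastD (d + 1) = l.getLastD d + 1 := by
  induction l generalizing d with
  | nil => simp
  | cons a l ih => simp only [List.map_cons, List.getLastD_cons]; exact ih a

theorem getLastD_map_cast (l : List Nat) (d : Nat) :
    (l.map (fun (k : Nat) => (k : Int))).getLastD (d : Int) = ((l.getLastD d : Nat) : Int) := by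
  induction l generalizing d with
  | nil => simp
  | cons a l ih => simp only [List.map_cons, List.getLastD_cons]; exact ih a

-- B in nat form
def bNat (xs : List String) : List String :=
  match nidx xs 0 with
  | [] => []
  | i :: rest => (xs.drop i).take (rest.getLastD i + 1 - i)

theorem alt_eq_bNat (lines : List String) : strip_blank_lines_py_alt lines = bNat lines := by
  unfold strip_blank_lines_py_alt bNat
  have e := enum_filter_eq_nidx lines 0
  rw [Nat.cast_zero] at e
  rw [e]
  cases h : nidx lines 0 with
  | nil => simp
  | cons i rest =>
    simp only [List.map_cons]
    rw [getLastD_map_cast rest i]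
    have : ((rest.getLastD i : Nat) : Int) + 1 = (((rest.getLastD i + 1 : Nat)) : Int) := by
      push_cast; ring
    rw [this, PySem.List.slice_natCast]

-- take up to the last non-blank index equals the right-strip (when a non-blank exists)
theorem take_last_eq_rstrip (xs : List String) :
    (match nidx xs 0 with
     | [] => rstripB xs = []
     | i :: rest => xs.take (rest.getLastD i + 1) = rstripB xs) := by
  induction xs with
  | nil => simp [nidx, rstripB]
  | cons x xs ih =>
    by_cases h : x == ""
    · rw [show nidx (x :: xs) 0 = (nidx xs 0).map (· + 1) by simp [nidx, h, nidx_shift]]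
      cases h0 : nidx xs 0 with
      | nil =>
        rw [h0] at ih
        simp [rstripB, h, ih]
      | cons i0 r0 =>
        rw [h0] at ih
        have hxs : xs ≠ [] := by
          intro hx; rw [hx] at h0; simp [nidx] at h0
        have hne : rstripB xs ≠ [] := by
          rw [← ih]
          cases xs with
          | nil => exact absurd rfl hxs
          | cons a as => simp
        simp only [List.map_cons]
        rw [getLastD_map_add r0 i0]
        have : r0.getLastD i0 + 1 + 1 = (r0.getLastD i0 + 1) + 1 := rfl
        rw [this, List.take_succ_cons, ih]
        simp [rstripB, hne]
    · rw [show nidx (x :: xs) 0 = 0 :: (nidx xs 0).map (· + 1) by simp [nidx, h, nidx_shift]]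
      cases h0 : nidx xs 0 with
      | nil =>
        rw [h0] at ih
        simp [rstripB, h, ih]
      | cons i0 r0 =>
        rw [h0] at ih
        simp only [List.map_cons, List.getLastD_cons]
        rw [getLastD_map_add r0 i0]
        rw [List.take_succ_cons, ih]
        simp [rstripB, h]

theorem bNat_eq (xs : List String) :
    bNat xs = rstripB (xs.dropWhile (fun x => x == "")) := by
  induction xs with
  | nil => simp [bNat, nidx, rstripB]
  | cons x xs ih =>
    by_cases h : x == ""
    · unfold bNat
      rw [show nidx (x :: xs) 0 = (nidx xs 0).map (· + 1) by simp [nidx, h, nidx_shift]]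
      rw [show (x :: xs).dropWhile (fun x => x == "") = xs.dropWhile (fun x => x == "") by
        simp [List.dropWhile, h]]
      rw [← ih]
      unfold bNat
      cases h0 : nidx xs 0 with
      | nil => simp
      | cons i0 r0 =>
        simp only [List.map_cons]
        rw [getLastD_map_add r0 i0]
        simp [Nat.succ_sub_succ]
    · have hd : (x :: xs).dropWhile (fun x => x == "") = x :: xs := by
        simp [List.dropWhile, h]
      rw [hd]
      have := take_last_eq_rstrip (x :: xs)
      rw [show nidx (x :: xs) 0 = 0 :: (nidx xs 0).map (· + 1) by simp [nidx, h, nidx_shift]] at this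
      unfold bNat
      rw [show nidx (x :: xs) 0 = 0 :: (nidx xs 0).map (· + 1) by simp [nidx, h, nidx_shift]]
      simpa using this

theorem a_eq (lines : List String) :
    strip_blank_lines_py lines = rstripB (lines.dropWhile (fun x => x == "")) := by
  unfold strip_blank_lines_py
  rw [pyDropBlankLoop_eq]
  by_cases h : lines.all (fun x => x == "")
  · have hd : lines.dropWhile (fun x => x == "") = [] := by
      induction lines with
      | nil => simp
      | cons a as ih =>
        simp only [List.all_cons, Bool.and_eq_true] at h
        simp [List.dropWhile, h.1, ih h.2]
    simp [h, hd, rstripB]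
  · simp only [h]
    rw [pyDropBlankLoop_eq]
    simp only []
    exact rev_dropWhile_rev (lines.dropWhile (fun x => x == ""))

-- ===== VERDICT (by name: the statement is the Claim_ definition above) =====
theorem strip_blank_lines_py_spec : Claim_equal_strip_blank_lines_py := by
  intro lines _
  unfold Spec_strip_blank_lines_py
  rw [a_eq, alt_eq_bNat, bNat_eq]
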